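-- pv_equiv track=rewrite | github.com/ruthhhs/UnivCodeJourney | semester_1/praktikum/daspro_7/A1/duelSihir.py | mcgonagall
-- ===== SOURCE A (Python) =====
-- def konso(e, L):
--     return [e] + L
--
-- def firstElmt(L):
--     return L[0]
--
-- def tail(L):
--     return L[1:]
--
-- def isEmpty(L):
--     return L == []
--
-- def mcgonagall(S, M) :
--     if isEmpty(S) and isEmpty(M) :
--         return []
--     else :
--         if firstElmt(S) < firstElmt(M) :
--             return konso(1, mcgonagall(tail(S), tail(M)))
--         else :
--             return konso(0, mcgonagall(tail(S), tail(M)))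
-- ===== SOURCE B (Python) =====
-- def mcgonagall(S, M):
--     res = []
--     i = 0
--     while i < len(S) or i < len(M):
--         x = S[i]
--         if x < M[i]:
--             res.append(1)
--         else:
--             res.append(0)
--         i += 1
--     return res
-- ===== Notes on version B (the rewrite author's own statement) =====
-- stated objective: faster
-- what changed: Replaced the head/tail recursion (which copies the list tail at every step via L[1:]) with a single iterative index loop appending to an accumulator, removing the per-step list copies and the recursion depth.
import Mathlib
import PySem

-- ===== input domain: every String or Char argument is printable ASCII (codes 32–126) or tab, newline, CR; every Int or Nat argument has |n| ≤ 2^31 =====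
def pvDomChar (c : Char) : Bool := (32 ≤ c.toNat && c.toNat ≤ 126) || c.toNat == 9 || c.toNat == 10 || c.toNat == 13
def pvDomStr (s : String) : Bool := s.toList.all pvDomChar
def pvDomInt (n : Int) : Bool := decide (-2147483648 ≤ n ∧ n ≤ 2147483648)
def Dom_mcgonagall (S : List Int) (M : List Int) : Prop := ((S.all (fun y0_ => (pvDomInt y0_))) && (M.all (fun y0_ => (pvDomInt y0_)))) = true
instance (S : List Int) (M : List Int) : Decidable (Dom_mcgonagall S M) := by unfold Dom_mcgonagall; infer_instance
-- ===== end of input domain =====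

-- ===== PORT A =====
-- B changes: iterative index loop with an accumulator instead of head/tail recursion; same values.
def konso (e : Int) (L : List Int) : List Int := e :: L

def isEmpty (L : List Int) : Bool := L == []

-- firstElmt/tail are realised by the pattern match: 'a :: s' gives firstElmt S = a, tail S = s.
-- On unequal lengths the Python's firstElmt raises IndexError (L[0] on []); that branch is outside Pre_.
def mcgonagall (S : List Int) (M : List Int) : List Int :=
  if isEmpty S && isEmpty M then []
  else
    match S, M with
    | a :: s, b :: m =>
        if a < b then konso 1 (mcgonagall s m) else konso 0 (mcgonagall s m)
    | _, _ => []  -- IndexError in Python (one list empty); unreachable under Pre_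

-- ===== PORT B =====
-- the while loop of Source B; S[i] raises IndexError when i ≥ len S (unequal lengths), outside Pre_.
def mcgonagallLoop (S : List Int) (M : List Int) (i : Nat) (res : List Int) : List Int :=
  if i < S.length || i < M.length then
    match PySem.List.pyGet? S (i : Int), PySem.List.pyGet? M (i : Int) with
    | some x, some y => mcgonagallLoop S M (i + 1) (res ++ [if x < y then 1 else 0])
    | _, _ => res  -- IndexError in Python; unreachable under Pre_
  else res
termination_by (max S.length M.length) - i
decreasing_by simp_all; omega

def mcgonagall_alt (S : List Int) (M : List Int) : List Int :=
  mcgonagallLoop S M 0 []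

-- ===== PRECONDITION & SPEC =====
-- Pre_ excludes unequal-length inputs, on which both Pythons raise IndexError.
def Pre_mcgonagall (S : List Int) (M : List Int) : Prop := S.length = M.length
instance (S : List Int) (M : List Int) : Decidable (Pre_mcgonagall S M) := by unfold Pre_mcgonagall; infer_instance
def pvWitness_mcgonagall : List Int × List Int := ([3, 5, 2], [4, 1, 2])

def Spec_mcgonagall (S : List Int) (M : List Int) (out : List Int) : Prop := out = mcgonagall_alt S M
instance (S : List Int) (M : List Int) (out : List Int) : Decidable (Spec_mcgonagall S M out) := by unfold Spec_mcgonagall; infer_instance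

-- ===== CLAIM (what is proved, stated in full; the proofs are below) =====
def Claim_equal_mcgonagall : Prop := ∀ (S : List Int) (M : List Int), Dom_mcgonagall S M → Pre_mcgonagall S M → Spec_mcgonagall S M (mcgonagall S M)

-- ===== LEMMAS AND PROOFS =====
lemma mcgonagall_cons (a b : Int) (s m : List Int) :
    mcgonagall (a :: s) (b :: m)
      = (if a < b then (1 : Int) else 0) :: mcgonagall s m := by
  rw [mcgonagall]
  simp [isEmpty, konso]
  split <;> rfl

-- loop invariant: with equal lengths and i ≤ length, the loop appends the compare
-- vector of the remaining suffixes to res.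
lemma mcgonagallLoop_eq (n : Nat) : ∀ (S M : List Int) (i : Nat) (res : List Int),
    S.length = M.length → S.length - i = n →
    mcgonagallLoop S M i res = res ++ mcgonagall (S.drop i) (M.drop i) := by
  induction n with
  | zero =>
      intro S M i res hlen hn
      rw [mcgonagallLoop]
      have hi : ¬ (i < S.length || i < M.length) = true := by
        simp; omega
      rw [if_neg hi]
      have h1 : S.drop i = [] := List.drop_eq_nil_of_le (by omega)
      have h2 : M.drop i = [] := List.drop_eq_nil_of_le (by omega)
      rw [h1, h2, mcgonagall]
      simp [isEmpty]
      intro a s b m h _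
      exact absurd h (by simp)
  | succ k ih =>
      intro S M i res hlen hn
      have hiS : i < S.length := by omega
      have hiM : i < M.length := by omega
      rw [mcgonagallLoop]
      have hc : (i < S.length || i < M.length) = true := by simp [hiS]
      rw [if_pos hc]
      rw [PySem.List.pyGet?_ofNat S i hiS, PySem.List.pyGet?_ofNat M i hiM]
      show mcgonagallLoop S M (i + 1) (res ++ [if S[i] < M[i] then (1 : Int) else 0]) = _
      rw [ih S M (i + 1) _ hlen (by omega)]
      have hdS : S.drop i = S[i] :: S.drop (i + 1) := (List.drop_eq_getElem_cons hiS)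
      have hdM : M.drop i = M[i] :: M.drop (i + 1) := (List.drop_eq_getElem_cons hiM)
      rw [hdS, hdM, mcgonagall_cons]
      simp

-- ===== VERDICT (by name: the statement is the Claim_ definition above) =====
theorem mcgonagall_spec : Claim_equal_mcgonagall := by
  intro S M _ hpre
  unfold Spec_mcgonagall mcgonagall_alt
  rw [mcgonagallLoop_eq (S.length) S M 0 [] hpre (by omega)]
  simp
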